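-- pv_equiv track=rewrite | github.com/kennethsolomon/shipkit | setup-optimizer/lib/enrich.py | generate_documentation_section
-- ===== SOURCE A (Python) =====
-- from typing import Dict, List
--
-- def generate_documentation_section(docs: Dict[str, str]) -> str:
--     """Generate Documentation & Resources section from discovered files.
--
--     Args:
--         docs: Dict of file_path -> description
--
--     Returns:
--         Formatted section content
--     """
--     if not docs:
--         return ''
--
--     lines = []
--
--     # Prioritize certain docs
--     priority_order = [
--         'README.md', 'CONTRIBUTING.md', 'docs/API.md', 'docs/api.md',
--         'docs/ARCHITECTURE.md', 'docs/architecture.md',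
--     ]
--
--     added = set()
--
--     # Add priority docs first
--     for pattern in priority_order:
--         if pattern in docs:
--             lines.append(f'- **{pattern}** - {docs[pattern]}')
--             added.add(pattern)
--
--     # Add remaining docs
--     for doc_path in sorted(docs.keys()):
--         if doc_path not in added:
--             description = docs[doc_path]
--             lines.append(f'- **{doc_path}** - {description}')
--
--     return '\n'.join(lines)
-- ===== SOURCE B (Python) =====
-- def generate_documentation_section(docs):
--     priority_order = [
--         'README.md', 'CONTRIBUTING.md', 'docs/API.md', 'docs/api.md',
--         'docs/ARCHITECTURE.md', 'docs/architecture.md',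
--     ]
--     rank = {p: i for i, p in enumerate(priority_order)}
--     n = len(priority_order)
--     ordered = sorted(docs, key=lambda p: (rank.get(p, n), p))
--     return '\n'.join(f'- **{p}** - {docs[p]}' for p in ordered)
-- ===== Notes on version B (the rewrite author's own statement) =====
-- stated objective: simpler
-- what changed: Replaces A's two shaped passes (priority scan with an `added` membership set, then a sorted scan skipping the added keys) by building a rank map once and producing the whole ordering with a single sorted(docs, key=(rank.get(p, n), p)) followed by one formatting pass; the precondition only excludes association lists with duplicate keys, which a Python dict cannot contain.
import Mathlib
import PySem

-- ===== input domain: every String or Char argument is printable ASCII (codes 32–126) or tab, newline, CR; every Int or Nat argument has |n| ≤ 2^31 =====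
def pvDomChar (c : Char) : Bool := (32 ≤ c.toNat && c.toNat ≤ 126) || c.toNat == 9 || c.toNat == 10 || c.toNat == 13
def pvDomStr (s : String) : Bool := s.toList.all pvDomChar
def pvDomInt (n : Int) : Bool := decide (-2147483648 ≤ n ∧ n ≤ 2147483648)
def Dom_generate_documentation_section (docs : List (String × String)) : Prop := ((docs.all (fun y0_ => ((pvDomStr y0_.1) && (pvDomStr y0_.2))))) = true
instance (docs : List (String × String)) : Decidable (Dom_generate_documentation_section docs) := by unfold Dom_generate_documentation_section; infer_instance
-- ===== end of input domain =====

-- B replaces A's two shaped passes and its `added` membership set by a rank map plus one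
-- key-based sort (key = (rank, name)) and a single formatting pass (objective: simpler).

-- ===== PORT A =====
def generate_documentation_section (docs : List (String × String)) : String :=
  let d : PySem.Dict String String := PySem.Dict.mk docs
  if docs = [] then ""
  else
    let priority_order : List String :=
      ["README.md", "CONTRIBUTING.md", "docs/API.md", "docs/api.md",
       "docs/ARCHITECTURE.md", "docs/architecture.md"]
    let st := priority_order.foldl
      (fun (st : List String × PySem.Set String) pattern =>
        (if d.contains pattern then st.1 ++ ["- **" ++ pattern ++ "** - " ++ d.getD pattern ""] else st.1,
         if d.contains pattern then PySem.Set.add st.2 pattern else st.2))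
      ([], PySem.Set.empty)
    let lines := (PySem.List.sorted d.keys (fun x => x)).foldl
      (fun acc doc_path =>
        if !(PySem.Set.contains st.2 doc_path) then
          acc ++ ["- **" ++ doc_path ++ "** - " ++ d.getD doc_path ""]
        else acc)
      st.1
    PySem.Str.join "\n" lines

def generate_documentation_section_alt (docs : List (String × String)) : String :=
  let priority_order : List String :=
    ["README.md", "CONTRIBUTING.md", "docs/API.md", "docs/api.md",
     "docs/ARCHITECTURE.md", "docs/architecture.md"]
  let rank : PySem.Dict String Int :=
    (PySem.List.enumerate priority_order).foldl
      (fun r ip => r.insert ip.2 ip.1) PySem.Dict.empty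
  let n : Int := (priority_order.length : Int)
  let d : PySem.Dict String String := PySem.Dict.mk docs
  let ordered := PySem.List.sorted2 d.keys (fun p => rank.getD p n) (fun p => p)
  PySem.Str.join "\n" (ordered.map (fun p => "- **" ++ p ++ "** - " ++ d.getD p ""))

-- ===== PRECONDITION & SPEC =====
-- Pre_ excludes association lists with duplicate keys: a Python dict cannot contain them, so
-- which of the duplicate values the association-list model picks is accidental.
def Pre_generate_documentation_section (docs : List (String × String)) : Prop :=
  (docs.map Prod.fst).Nodup
instance (docs : List (String × String)) : Decidable (Pre_generate_documentation_section docs) := by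
  unfold Pre_generate_documentation_section; infer_instance

def pvWitness_generate_documentation_section : (List (String × String)) :=
  [("README.md", "Project readme"), ("docs/guide.md", "User guide"), ("CHANGELOG.md", "History")]

def Spec_generate_documentation_section (docs : List (String × String)) (out : String) : Prop := out = generate_documentation_section_alt docs
instance (docs : List (String × String)) (out : String) : Decidable (Spec_generate_documentation_section docs out) := by unfold Spec_generate_documentation_section; infer_instance

-- ===== CLAIM (what is proved, stated in full; the proofs are below) =====
def Claim_equal_generate_documentation_section : Prop := ∀ (docs : List (String × String)), Dom_generate_documentation_section docs → Pre_generate_documentation_section docs → Spec_generate_documentation_section docs (generate_documentation_section docs)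

-- ===== LEMMAS AND PROOFS =====

def pvPrio : List String :=
  ["README.md", "CONTRIBUTING.md", "docs/API.md", "docs/api.md",
   "docs/ARCHITECTURE.md", "docs/architecture.md"]
def pvRank : PySem.Dict String Int :=
  (PySem.List.enumerate pvPrio).foldl (fun r ip => r.insert ip.2 ip.1) PySem.Dict.empty
def pvKey (p : String) : Lex (Int × String) := toLex (pvRank.getD p 6, p)

theorem pvRank_getD_of_not_mem (p : String) (h : p ∉ pvPrio) : pvRank.getD p 6 = 6 := by
  simp [pvPrio] at h
  obtain ⟨h1,h2,h3,h4,h5,h6⟩ := h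
  simp [pvRank, pvPrio, PySem.List.enumerate_cons, PySem.List.enumerate_nil]
  simp [PySem.Dict.getD_insert, h1,h2,h3,h4,h5,h6, PySem.Dict.getD_empty]

theorem pvRank_getD_lt_of_mem (p : String) (h : p ∈ pvPrio) : pvRank.getD p 6 < 6 := by
  fin_cases h <;> decide

theorem pvPrio_pairwise : pvPrio.Pairwise (fun a b => pvKey a < pvKey b) := by decide

theorem pv_sorted2_eq_sorted_lex {α : Type} (xs : List α) (k1 : α → Int) (k2 : α → String) :
    PySem.List.sorted2 xs k1 k2 = PySem.List.sorted xs (fun x => toLex (k1 x, k2 x)) := by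
  have hbe : (fun a b => decide (k1 a < k1 b) || (!decide (k1 b < k1 a) && decide (k2 a < k2 b)))
      = fun a b => decide ((fun x => toLex (k1 x, k2 x)) a < (fun x => toLex (k1 x, k2 x)) b) := by
    funext a b
    rcases lt_trichotomy (k1 a) (k1 b) with h | h | h
    · simp [Prod.Lex.lt_iff, h, not_lt_of_gt h]
    · simp [Prod.Lex.lt_iff, h]
    · simp [Prod.Lex.lt_iff, h, not_lt_of_gt h, (ne_of_lt h).symm]
  rw [PySem.List.sorted_eq_foldl_insertBy]
  unfold PySem.List.sorted2
  rw [hbe]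
  simp

theorem pv_main (docs : List (String × String))
    (hnd : (docs.map Prod.fst).Nodup) :
    generate_documentation_section docs = generate_documentation_section_alt docs := by
  by_cases hd : docs = []
  · subst hd; rfl
  · unfold generate_documentation_section generate_documentation_section_alt
    simp only [if_neg hd]
    rw [PySem.List.foldl_prod_mk
      (f := fun acc pattern => if (PySem.Dict.mk docs).contains pattern then acc ++ ["- **" ++ pattern ++ "** - " ++ (PySem.Dict.mk docs).getD pattern ""] else acc)
      (g := fun acc pattern => if (PySem.Dict.mk docs).contains pattern then PySem.Set.add acc pattern else acc)]
    simp only [PySem.List.foldl_append_singleton_eq_map,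
      PySem.List.foldl_if_eq_foldl_filter, PySem.Set.empty, ← PySem.Set.ofList_eq_foldl,
      List.nil_append, ← List.map_append]
    rw [pv_sorted2_eq_sorted_lex]
    have hrk : (fun (x : String) =>
        toLex (((PySem.List.enumerate ["README.md", "CONTRIBUTING.md", "docs/API.md", "docs/api.md",
            "docs/ARCHITECTURE.md", "docs/architecture.md"]).foldl (fun r ip => r.insert ip.2 ip.1)
            PySem.Dict.empty).getD x (↑(["README.md", "CONTRIBUTING.md", "docs/API.md", "docs/api.md",
            "docs/ARCHITECTURE.md", "docs/architecture.md"].length) : Int), x))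
        = fun p => toLex (pvRank.getD p 6, p) := rfl
    rw [hrk]
    have hks : (PySem.Dict.mk docs).keys = docs.map Prod.fst := by
      simp [PySem.Dict.keys]
    have hksnd : (PySem.Dict.mk docs).keys.Nodup := by rw [hks]; exact hnd
    have hprnd : pvPrio.Nodup := by decide
    have hmemP : ∀ x, x ∈ pvPrio.filter (PySem.Dict.mk docs).contains ↔
        x ∈ pvPrio ∧ x ∈ (PySem.Dict.mk docs).keys := by
      intro x
      simp [List.mem_filter, PySem.Dict.contains_eq_decide_mem_keys]
    have hPnd : (pvPrio.filter (PySem.Dict.mk docs).contains).Nodup := hprnd.filter _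
    have hperm1 : (pvPrio.filter (PySem.Dict.mk docs).contains).Perm
        ((PySem.Dict.mk docs).keys.filter (fun p => decide (p ∈ pvPrio))) := by
      rw [List.perm_ext_iff_of_nodup hPnd (hksnd.filter _)]
      intro a
      simp [hmemP a, List.mem_filter]
      tauto
    have hRcongr : List.filter
        (fun x => !(PySem.Set.ofList (pvPrio.filter (PySem.Dict.mk docs).contains)).contains x)
        (PySem.List.sorted (PySem.Dict.mk docs).keys (fun x => x))
        = List.filter (fun x => !decide (x ∈ pvPrio))
          (PySem.List.sorted (PySem.Dict.mk docs).keys (fun x => x)) := by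
      apply List.filter_congr
      intro x hx
      have hxk : x ∈ (PySem.Dict.mk docs).keys := (PySem.List.mem_sorted _ _ _ x).1 hx
      rw [hks] at hxk
      obtain ⟨⟨a, b⟩, hab, rfl⟩ := List.mem_map.1 hxk
      rw [Bool.eq_iff_iff]
      simp [PySem.Set.mem_ofList, hmemP _]
      constructor
      · intro h hp
        exact (h hp b) hab
      · intro h hp
        exact absurd hp h
    have hRperm : (List.filter (fun x => !decide (x ∈ pvPrio))
        (PySem.List.sorted (PySem.Dict.mk docs).keys (fun x => x))).Perm
        ((PySem.Dict.mk docs).keys.filter (fun x => !decide (x ∈ pvPrio))) :=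
      (PySem.List.sorted_perm _ _ _).filter _
    have hperm : ((pvPrio.filter (PySem.Dict.mk docs).contains) ++
        List.filter (fun x => !decide (x ∈ pvPrio))
          (PySem.List.sorted (PySem.Dict.mk docs).keys (fun x => x))).Perm
        (PySem.Dict.mk docs).keys := by
      refine (hperm1.append hRperm).trans ?_
      exact List.filter_append_perm _ _
    have hpw : ((pvPrio.filter (PySem.Dict.mk docs).contains) ++
        List.filter (fun x => !decide (x ∈ pvPrio))
          (PySem.List.sorted (PySem.Dict.mk docs).keys (fun x => x))).Pairwise
        (fun a b => toLex (pvRank.getD a 6, a) < toLex (pvRank.getD b 6, b)) := by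
      rw [List.pairwise_append]
      refine ⟨List.Pairwise.sublist List.filter_sublist pvPrio_pairwise, ?_, ?_⟩
      · have hnd2 : (PySem.List.sorted (PySem.Dict.mk docs).keys (fun x => x)).Nodup :=
          ((PySem.List.sorted_perm _ _ _).nodup_iff).2 hksnd
        have hlt : (PySem.List.sorted (PySem.Dict.mk docs).keys (fun x => x)).Pairwise (· < ·) :=
          ((PySem.List.sorted_pairwise _ _).and hnd2).imp
            (fun h => lt_of_le_of_ne h.1 h.2)
        have hRlt : (List.filter (fun x => !decide (x ∈ pvPrio))
            (PySem.List.sorted (PySem.Dict.mk docs).keys (fun x => x))).Pairwise (· < ·) :=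
          List.Pairwise.sublist List.filter_sublist hlt
        refine List.Pairwise.imp_of_mem ?_ hRlt
        intro a b ha hb hab
        have hna : a ∉ pvPrio := by
          have := (List.mem_filter.1 ha).2; simpa using this
        have hnb : b ∉ pvPrio := by
          have := (List.mem_filter.1 hb).2; simpa using this
        exact Prod.Lex.lt_iff.mpr (Or.inr ⟨by
          rw [pvRank_getD_of_not_mem a hna, pvRank_getD_of_not_mem b hnb]; rfl, hab⟩)
      · intro a ha b hb
        have haP : a ∈ pvPrio := (List.mem_filter.1 ha).1
        have hnb : b ∉ pvPrio := by
          have := (List.mem_filter.1 hb).2; simpa using this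
        exact Prod.Lex.lt_iff.mpr (Or.inl (by
          rw [pvRank_getD_of_not_mem b hnb]; exact pvRank_getD_lt_of_mem a haP))
    have hsorted := PySem.List.sorted_eq_of_perm_of_pairwise_lt (PySem.Dict.mk docs).keys _ _ hperm hpw
    rw [hsorted, hRcongr.symm]
    rfl

-- ===== VERDICT (by name: the statement is the Claim_ definition above) =====
theorem generate_documentation_section_spec : Claim_equal_generate_documentation_section := by
  intro docs _ hpre
  unfold Spec_generate_documentation_section
  exact pv_main docs hpre
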